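-- pv_equiv track=rewrite | github.com/Jerry2T/cdac | python/pydsa/minprod.py | min_product
-- ===== SOURCE A (Python) =====
-- def min_product(nums):
--     if not nums:
--         return 0
--
--     curr_max = curr_min = result = nums[0]
--
--     for num in nums[1:]:
--         # When multiplied by a negative number,
--         # max becomes min and min becomes max.
--         if num < 0:
--             curr_max, curr_min = curr_min, curr_max
--
--         curr_max = max(num, curr_max * num)
--         curr_min = min(num, curr_min * num)
--
--         result = min(result, curr_min)
--
--     return result
-- ===== SOURCE B (Python) =====
-- def min_product(nums):
--     if not nums:
--         return 0
--     result = nums[0]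
--     n = len(nums)
--     for i in range(n):
--         prod = 1
--         for j in range(i, n):
--             prod *= nums[j]
--             if prod < result:
--                 result = prod
--     return result
-- ===== Notes on version B (the rewrite author's own statement) =====
-- stated objective: simpler
-- what changed: Replaces the Kadane-style single pass tracking swapped running max/min products with a plain O(n^2) brute force that extends a running product from every start index and keeps the global minimum.
import Mathlib
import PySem

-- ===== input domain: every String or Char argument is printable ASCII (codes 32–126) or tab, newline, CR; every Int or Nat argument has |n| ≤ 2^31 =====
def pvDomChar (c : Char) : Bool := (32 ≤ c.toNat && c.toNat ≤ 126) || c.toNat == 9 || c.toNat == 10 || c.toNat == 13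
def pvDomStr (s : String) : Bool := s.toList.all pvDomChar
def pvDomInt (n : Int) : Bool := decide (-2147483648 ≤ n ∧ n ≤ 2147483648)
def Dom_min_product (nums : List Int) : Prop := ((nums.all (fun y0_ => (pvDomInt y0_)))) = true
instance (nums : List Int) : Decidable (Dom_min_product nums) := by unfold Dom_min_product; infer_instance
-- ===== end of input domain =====

-- B replaces A's single-pass swapped running-max/min recurrence by the plain O(n^2) brute force
-- over all start indices (simpler to read; not faster).

-- ===== PORT A =====
-- A's loop body: optional swap on negative num, then the two running products and the result.
def mpStep (s : Int × Int × Int) (num : Int) : Int × Int × Int :=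
  let cm := if num < 0 then s.2.1 else s.1
  let cn := if num < 0 then s.1 else s.2.1
  let cm' := max num (cm * num)
  let cn' := min num (cn * num)
  (cm', cn', min s.2.2 cn')

def min_product (nums : List Int) : Int :=
  match nums with
  | [] => 0
  | x :: rest => (rest.foldl mpStep (x, x, x)).2.2

-- ===== PORT B =====
-- inner loop of B: extend the running product rightwards, keeping the best so far
def mpInner : Int → Int → List Int → Int
  | result, _, [] => result
  | result, prod, x :: xs =>
    let p := prod * x
    mpInner (if p < result then p else result) p xs

-- outer loop of B: one inner run per start index (suffix)
def mpOuter : Int → List Int → Int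
  | result, [] => result
  | result, x :: xs => mpOuter (mpInner result 1 (x :: xs)) xs

def min_product_alt (nums : List Int) : Int :=
  match nums with
  | [] => 0
  | x :: _ => mpOuter x nums

-- ===== PRECONDITION & SPEC =====
def Spec_min_product (nums : List Int) (out : Int) : Prop := out = min_product_alt nums
instance (nums : List Int) (out : Int) : Decidable (Spec_min_product nums out) := by unfold Spec_min_product; infer_instance

-- ===== CLAIM (what is proved, stated in full; the proofs are below) =====
def Claim_equal_min_product : Prop := ∀ (nums : List Int), Dom_min_product nums → Spec_min_product nums (min_product nums)

-- ===== LEMMAS AND PROOFS =====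

-- ghost data: products of subarrays, grouped by end position (A's traversal)
def stepE (E : List Int) (num : Int) : List Int := num :: E.map (· * num)

def extAll : List Int → List Int → List Int
  | _, [] => []
  | E, num :: rest => stepE E num ++ extAll (stepE E num) rest

-- ghost data: products of subarrays, grouped by start position (B's traversal)
def prefixP : Int → List Int → List Int
  | _, [] => []
  | p, y :: ys => (p * y) :: prefixP (p * y) ys

def allP : List Int → List Int
  | [] => []
  | y :: ys => prefixP 1 (y :: ys) ++ allP ys

def Lmax : List Int → Int
  | [] => 0
  | y :: ys => ys.foldl max y

def Lmin : List Int → Int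
  | [] => 0
  | y :: ys => ys.foldl min y

lemma max_mul_right_nonneg (a b c : Int) (hc : 0 ≤ c) : max (a*c) (b*c) = max a b * c := by
  rcases le_total a b with h | h
  · rw [max_eq_right (mul_le_mul_of_nonneg_right h hc), max_eq_right h]
  · rw [max_eq_left (mul_le_mul_of_nonneg_right h hc), max_eq_left h]

lemma min_mul_right_nonneg (a b c : Int) (hc : 0 ≤ c) : min (a*c) (b*c) = min a b * c := by
  rcases le_total a b with h | h
  · rw [min_eq_left (mul_le_mul_of_nonneg_right h hc), min_eq_left h]
  · rw [min_eq_right (mul_le_mul_of_nonneg_right h hc), min_eq_right h]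

lemma max_mul_right_nonpos (a b c : Int) (hc : c ≤ 0) : max (a*c) (b*c) = min a b * c := by
  rcases le_total a b with h | h
  · rw [max_eq_left (mul_le_mul_of_nonpos_right h hc), min_eq_left h]
  · rw [max_eq_right (mul_le_mul_of_nonpos_right h hc), min_eq_right h]

lemma min_mul_right_nonpos (a b c : Int) (hc : c ≤ 0) : min (a*c) (b*c) = max a b * c := by
  rcases le_total a b with h | h
  · rw [min_eq_right (mul_le_mul_of_nonpos_right h hc), max_eq_right h]
  · rw [min_eq_left (mul_le_mul_of_nonpos_right h hc), max_eq_left h]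

lemma foldl_max_map_nonneg (c : Int) (hc : 0 ≤ c) :
    ∀ (l : List Int) (a : Int), List.foldl max (a*c) (l.map (· * c)) = (List.foldl max a l) * c
  | [], _ => rfl
  | y :: ys, a => by
    simp only [List.map, List.foldl]
    rw [max_mul_right_nonneg a y c hc]
    exact foldl_max_map_nonneg c hc ys (max a y)

lemma foldl_min_map_nonneg (c : Int) (hc : 0 ≤ c) :
    ∀ (l : List Int) (a : Int), List.foldl min (a*c) (l.map (· * c)) = (List.foldl min a l) * c
  | [], _ => rfl
  | y :: ys, a => by
    simp only [List.map, List.foldl]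
    rw [min_mul_right_nonneg a y c hc]
    exact foldl_min_map_nonneg c hc ys (min a y)

lemma foldl_max_map_nonpos (c : Int) (hc : c ≤ 0) :
    ∀ (l : List Int) (a : Int), List.foldl max (a*c) (l.map (· * c)) = (List.foldl min a l) * c
  | [], _ => rfl
  | y :: ys, a => by
    simp only [List.map, List.foldl]
    rw [max_mul_right_nonpos a y c hc]
    exact foldl_max_map_nonpos c hc ys (min a y)

lemma foldl_min_map_nonpos (c : Int) (hc : c ≤ 0) :
    ∀ (l : List Int) (a : Int), List.foldl min (a*c) (l.map (· * c)) = (List.foldl max a l) * c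
  | [], _ => rfl
  | y :: ys, a => by
    simp only [List.map, List.foldl]
    rw [min_mul_right_nonpos a y c hc]
    exact foldl_min_map_nonpos c hc ys (max a y)

lemma foldl_min_min : ∀ (l : List Int) (a b : Int),
    List.foldl min (min a b) l = min a (List.foldl min b l)
  | [], _, _ => rfl
  | y :: ys, a, b => by
    simp only [List.foldl]
    rw [min_assoc]
    exact foldl_min_min ys a (min b y)

lemma foldl_max_max : ∀ (l : List Int) (a b : Int),
    List.foldl max (max a b) l = max a (List.foldl max b l)
  | [], _, _ => rfl
  | y :: ys, a, b => by
    simp only [List.foldl]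
    rw [max_assoc]
    exact foldl_max_max ys a (max b y)

lemma foldl_min_cons' (r y : Int) (ys : List Int) :
    List.foldl min r (y :: ys) = min r (Lmin (y :: ys)) := by
  show List.foldl min (min r y) ys = min r (List.foldl min y ys)
  exact foldl_min_min ys r y

lemma Lmax_stepE (e : Int) (es : List Int) (num : Int) :
    Lmax (stepE (e :: es) num) = max num ((if num < 0 then Lmin (e :: es) else Lmax (e :: es)) * num) := by
  show List.foldl max num ((e*num) :: es.map (· * num)) = _
  have h1 : List.foldl max num ((e*num) :: es.map (· * num))
      = max num (List.foldl max (e*num) (es.map (· * num))) := by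
    show List.foldl max (max num (e*num)) (es.map (· * num)) = _
    exact foldl_max_max _ num (e*num)
  rw [h1]
  by_cases h : num < 0
  · rw [if_pos h]
    show _ = max num (List.foldl min e es * num)
    rw [foldl_max_map_nonpos num h.le es e]
  · rw [if_neg h]
    show _ = max num (List.foldl max e es * num)
    rw [foldl_max_map_nonneg num (not_lt.mp h) es e]

lemma Lmin_stepE (e : Int) (es : List Int) (num : Int) :
    Lmin (stepE (e :: es) num) = min num ((if num < 0 then Lmax (e :: es) else Lmin (e :: es)) * num) := by
  show List.foldl min num ((e*num) :: es.map (· * num)) = _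
  have h1 : List.foldl min num ((e*num) :: es.map (· * num))
      = min num (List.foldl min (e*num) (es.map (· * num))) := by
    show List.foldl min (min num (e*num)) (es.map (· * num)) = _
    exact foldl_min_min _ num (e*num)
  rw [h1]
  by_cases h : num < 0
  · rw [if_pos h]
    show _ = min num (List.foldl max e es * num)
    rw [foldl_min_map_nonpos num h.le es e]
  · rw [if_neg h]
    show _ = min num (List.foldl min e es * num)
    rw [foldl_min_map_nonneg num (not_lt.mp h) es e]

lemma A_inv : ∀ (rest E : List Int), E ≠ [] → ∀ (res : Int),
    List.foldl mpStep (Lmax E, Lmin E, res) rest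
      = (Lmax (List.foldl stepE E rest), Lmin (List.foldl stepE E rest),
         List.foldl min res (extAll E rest)) := by
  intro rest
  induction rest with
  | nil => intro E _ res; simp [extAll]
  | cons num rest' ih =>
    intro E hE res
    obtain ⟨e, es, rfl⟩ := List.exists_cons_of_ne_nil hE
    have hstep : mpStep (Lmax (e :: es), Lmin (e :: es), res) num
        = (Lmax (stepE (e :: es) num), Lmin (stepE (e :: es) num),
           List.foldl min res (stepE (e :: es) num)) := by
      unfold mpStep
      rw [Lmax_stepE, Lmin_stepE]
      have h3 : List.foldl min res (stepE (e :: es) num)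
          = min res (Lmin (stepE (e :: es) num)) := by
        show List.foldl min res (num :: (e::es).map (· * num)) = _
        exact foldl_min_cons' res num _
      rw [h3, Lmin_stepE]
    show List.foldl mpStep (mpStep (Lmax (e :: es), Lmin (e :: es), res) num) rest' = _
    rw [hstep]
    rw [ih (stepE (e :: es) num) (by simp [stepE]) (List.foldl min res (stepE (e :: es) num))]
    have hx : extAll (e :: es) (num :: rest') = stepE (e :: es) num ++ extAll (stepE (e :: es) num) rest' := rfl
    rw [hx, List.foldl_append]
    rfl

lemma minA_char (x : Int) (rest : List Int) :
    min_product (x :: rest) = List.foldl min x (extAll [x] rest) := by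
  have h := A_inv rest [x] (by simp) x
  show (List.foldl mpStep (x, x, x) rest).2.2 = _
  have hs : (Lmax [x], Lmin [x], x) = ((x, x, x) : Int × Int × Int) := rfl
  rw [hs] at h
  rw [h]

lemma if_lt_eq_min (p res : Int) : (if p < res then p else res) = min res p := by
  simp only [min_def]
  split_ifs <;> omega

lemma mpInner_eq : ∀ (l : List Int) (res p : Int),
    mpInner res p l = List.foldl min res (prefixP p l)
  | [], _, _ => rfl
  | y :: ys, res, p => by
    show mpInner (if p*y < res then p*y else res) (p*y) ys
        = List.foldl min (min res (p*y)) (prefixP (p*y) ys)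
    rw [if_lt_eq_min]
    exact mpInner_eq ys (min res (p*y)) (p*y)

lemma mpOuter_eq : ∀ (l : List Int) (res : Int),
    mpOuter res l = List.foldl min res (allP l)
  | [], _ => rfl
  | y :: ys, res => by
    show mpOuter (mpInner res 1 (y :: ys)) ys = List.foldl min res (prefixP 1 (y :: ys) ++ allP ys)
    rw [mpInner_eq, List.foldl_append]
    exact mpOuter_eq ys _

lemma minB_char (x : Int) (rest : List Int) :
    min_product_alt (x :: rest) = List.foldl min x (allP (x :: rest)) := by
  show mpOuter x (x :: rest) = _
  rw [mpOuter_eq]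

lemma foldl_min_le_seed : ∀ (l : List Int) (r : Int), List.foldl min r l ≤ r
  | [], r => le_refl r
  | y :: ys, r => le_trans (foldl_min_le_seed ys (min r y)) (min_le_left r y)

lemma foldl_min_le_mem : ∀ (l : List Int) (r a : Int), a ∈ l → List.foldl min r l ≤ a
  | y :: ys, r, a, h => by
    rcases List.mem_cons.mp h with rfl | h
    · exact le_trans (foldl_min_le_seed ys (min r a)) (min_le_right r a)
    · exact foldl_min_le_mem ys (min r y) a h

lemma foldl_min_mem_or : ∀ (l : List Int) (r : Int),
    List.foldl min r l = r ∨ List.foldl min r l ∈ l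
  | [], _ => Or.inl rfl
  | y :: ys, r => by
    rcases foldl_min_mem_or ys (min r y) with h | h
    · rcases le_total r y with hry | hyr
      · left
        show List.foldl min (min r y) ys = r
        rw [h, min_eq_left hry]
      · right
        show List.foldl min (min r y) ys ∈ y :: ys
        rw [h, min_eq_right hyr]
        exact List.mem_cons_self
    · right; exact List.mem_cons_of_mem y h

lemma foldl_min_eq_of (r : Int) (l1 l2 : List Int)
    (h1 : ∀ a, a ∈ l1 → a ∈ l2 ∨ a = r) (h2 : ∀ a, a ∈ l2 → a ∈ l1 ∨ a = r) :
    List.foldl min r l1 = List.foldl min r l2 := by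
  apply le_antisymm
  · rcases foldl_min_mem_or l2 r with h | h
    · rw [h]; exact foldl_min_le_seed l1 r
    · rcases h2 _ h with hm | he
      · exact foldl_min_le_mem l1 r _ hm
      · rw [he]; exact foldl_min_le_seed l1 r
  · rcases foldl_min_mem_or l1 r with h | h
    · rw [h]; exact foldl_min_le_seed l2 r
    · rcases h1 _ h with hm | he
      · exact foldl_min_le_mem l2 r _ hm
      · rw [he]; exact foldl_min_le_seed l2 r

lemma mem_prefixP : ∀ (l : List Int) (p a : Int),
    a ∈ prefixP p l ↔ ∃ t t', l = t ++ t' ∧ t ≠ [] ∧ a = List.foldl (· * ·) p t := by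
  intro l
  induction l with
  | nil =>
    intro p a
    simp only [prefixP, List.not_mem_nil, false_iff]
    rintro ⟨t, t', h, ht, _⟩
    exact ht (List.append_eq_nil_iff.mp h.symm).1
  | cons y ys ih =>
    intro p a
    constructor
    · intro h
      rcases List.mem_cons.mp h with rfl | h
      · exact ⟨[y], ys, rfl, by simp, rfl⟩
      · obtain ⟨t, t', rfl, ht, rfl⟩ := (ih (p*y) _).mp h
        exact ⟨y :: t, t', rfl, by simp, rfl⟩
    · rintro ⟨t, t', hsplit, ht, rfl⟩
      cases t with
      | nil => exact absurd rfl ht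
      | cons y' t0 =>
        rw [List.cons_append] at hsplit
        injection hsplit with hy hys
        subst hy
        cases t0 with
        | nil => exact List.mem_cons_self
        | cons z t1 =>
          exact List.mem_cons_of_mem _ ((ih (p*y) _).mpr ⟨z :: t1, t', hys, by simp, rfl⟩)

lemma mem_allP : ∀ (l : List Int) (a : Int),
    a ∈ allP l ↔ ∃ pre t post, l = pre ++ t ++ post ∧ t ≠ [] ∧ a = List.foldl (· * ·) 1 t := by
  intro l
  induction l with
  | nil =>
    intro a
    simp only [allP, List.not_mem_nil, false_iff]
    rintro ⟨pre, t, post, h, ht, _⟩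
    rcases List.append_eq_nil_iff.mp h.symm with ⟨h1, h2⟩
    exact ht (List.append_eq_nil_iff.mp h1).2
  | cons y ys ih =>
    intro a
    constructor
    · intro h
      rcases List.mem_append.mp h with h | h
      · obtain ⟨t, t', hsplit, ht, rfl⟩ := (mem_prefixP _ 1 _).mp h
        exact ⟨[], t, t', by simpa using hsplit, ht, rfl⟩
      · obtain ⟨pre, t, post, rfl, ht, rfl⟩ := (ih _).mp h
        exact ⟨y :: pre, t, post, rfl, ht, rfl⟩
    · rintro ⟨pre, t, post, hsplit, ht, rfl⟩
      cases pre with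
      | nil =>
        exact List.mem_append_left _ ((mem_prefixP _ 1 _).mpr ⟨t, post, by simpa using hsplit, ht, rfl⟩)
      | cons y' pre0 =>
        rw [List.cons_append] at hsplit
        injection hsplit with hy hys
        exact List.mem_append_right _ ((ih _).mpr ⟨pre0, t, post, hys, ht, rfl⟩)

lemma mem_extAll : ∀ (rest E : List Int) (a : Int),
    a ∈ extAll E rest ↔
      ((∃ p, p ∈ E ∧ ∃ q q', rest = q ++ q' ∧ q ≠ [] ∧ a = List.foldl (· * ·) p q) ∨
       (∃ pre t post, rest = pre ++ t ++ post ∧ t ≠ [] ∧ a = List.foldl (· * ·) 1 t)) := by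
  intro rest
  induction rest with
  | nil =>
    intro E a
    simp only [extAll, List.not_mem_nil, false_iff]
    rintro (⟨p, _, q, q', h, hq, _⟩ | ⟨pre, t, post, h, ht, _⟩)
    · exact hq (List.append_eq_nil_iff.mp h.symm).1
    · rcases List.append_eq_nil_iff.mp h.symm with ⟨h1, _⟩
      exact ht (List.append_eq_nil_iff.mp h1).2
  | cons num rest' ih =>
    intro E a
    have hE' : extAll E (num :: rest') = stepE E num ++ extAll (stepE E num) rest' := rfl
    rw [hE', List.mem_append, ih (stepE E num) a]
    constructor
    · rintro (hmem | ⟨p, hp, q, q', rfl, hq, rfl⟩ | ⟨pre, t, post, rfl, ht, rfl⟩)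
      · rcases List.mem_cons.mp hmem with heq | hmap
        · right
          exact ⟨[], [num], rest', rfl, by simp, by simp [heq]⟩
        · obtain ⟨p, hp, heq⟩ := List.mem_map.mp hmap
          left
          exact ⟨p, hp, [num], rest', rfl, by simp, by simp [heq.symm]⟩
      · rcases List.mem_cons.mp hp with heq | hmap
        · right
          refine ⟨[], num :: q, q', by simp, by simp, ?_⟩
          show List.foldl (· * ·) p q = List.foldl (· * ·) (1 * num) q
          rw [heq, one_mul]
        · obtain ⟨p0, hp0, heq⟩ := List.mem_map.mp hmap
          left
          refine ⟨p0, hp0, num :: q, q', by simp, by simp, ?_⟩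
          show List.foldl (· * ·) p q = List.foldl (· * ·) (p0 * num) q
          rw [heq]
      · right
        exact ⟨num :: pre, t, post, by simp, ht, rfl⟩
    · rintro (⟨p, hp, q, q', hsplit, hq, rfl⟩ | ⟨pre, t, post, hsplit, ht, rfl⟩)
      · cases q with
        | nil => exact absurd rfl hq
        | cons n0 q0 =>
          rw [List.cons_append] at hsplit
          injection hsplit with h1 h2
          subst h1
          cases q0 with
          | nil =>
            left
            exact List.mem_cons_of_mem _ (List.mem_map.mpr ⟨p, hp, rfl⟩)
          | cons z q1 =>
            right; left
            exact ⟨p * num, List.mem_cons_of_mem _ (List.mem_map.mpr ⟨p, hp, rfl⟩),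
              z :: q1, q', h2, by simp, rfl⟩
      · cases pre with
        | nil =>
          cases t with
          | nil => exact absurd rfl ht
          | cons n0 t0 =>
            rw [List.nil_append, List.cons_append] at hsplit
            injection hsplit with h1 h2
            subst h1
            cases t0 with
            | nil =>
              left
              show List.foldl (· * ·) (1 * num) [] ∈ _
              rw [one_mul]
              exact List.mem_cons_self
            | cons z t1 =>
              right; left
              refine ⟨num, List.mem_cons_self, z :: t1, post, h2, by simp, ?_⟩
              show List.foldl (· * ·) (1 * num) (z :: t1) = List.foldl (· * ·) num (z :: t1)
              rw [one_mul]
        | cons n0 pre0 =>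
          rw [List.cons_append, List.cons_append] at hsplit
          injection hsplit with h1 h2
          right; right
          exact ⟨pre0, t, post, h2, ht, rfl⟩

-- ===== VERDICT (by name: the statement is the Claim_ definition above) =====
theorem min_product_spec : Claim_equal_min_product := by
  intro nums _
  show min_product nums = min_product_alt nums
  cases nums with
  | nil => rfl
  | cons x rest =>
    rw [minA_char, minB_char]
    apply foldl_min_eq_of
    · intro a ha
      left
      rcases (mem_extAll rest [x] a).mp ha with ⟨p, hp, q, q', rfl, hq, rfl⟩ | ⟨pre, t, post, rfl, ht, rfl⟩
      · have hpx : p = x := by simpa using hp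
        subst hpx
        refine (mem_allP _ _).mpr ⟨[], p :: q, q', by simp, by simp, ?_⟩
        show List.foldl (· * ·) p q = List.foldl (· * ·) (1 * p) q
        rw [one_mul]
      · exact (mem_allP _ _).mpr ⟨x :: pre, t, post, by simp, ht, rfl⟩
    · intro a ha
      rcases (mem_allP _ a).mp ha with ⟨pre, t, post, hsplit, ht, rfl⟩
      cases pre with
      | nil =>
        cases t with
        | nil => exact absurd rfl ht
        | cons n0 t0 =>
          rw [List.nil_append, List.cons_append] at hsplit
          injection hsplit with h1 h2
          subst h1
          cases t0 with
          | nil =>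
            right
            show List.foldl (· * ·) (1 * x) [] = x
            rw [one_mul]; rfl
          | cons z t1 =>
            left
            refine (mem_extAll _ _ _).mpr (Or.inl ⟨x, by simp, z :: t1, post, h2, by simp, ?_⟩)
            show List.foldl (· * ·) (1 * x) (z :: t1) = List.foldl (· * ·) x (z :: t1)
            rw [one_mul]
      | cons n0 pre0 =>
        rw [List.cons_append, List.cons_append] at hsplit
        injection hsplit with h1 h2
        left
        exact (mem_extAll _ _ _).mpr (Or.inr ⟨pre0, t, post, h2, ht, rfl⟩)
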